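-- pv_equiv track=rewrite | github.com/lufftw/neetcode | solutions/2569_handling_sum_queries_after_update.py | handleQuery
-- ===== SOURCE A (Python) =====
-- from typing import List
--
-- def handleQuery(
--     nums1: List[int], nums2: List[int], queries: List[List[int]]
-- ) -> List[int]:
--     n = len(nums1)
--
--     # Segment tree: tree[i] = count of 1s in segment
--     # Lazy: lazy[i] = 1 means segment needs toggle
--     tree = [0] * (4 * n)
--     lazy = [0] * (4 * n)
--
--     def build(node: int, start: int, end: int) -> None:
--         """Build segment tree from nums1."""
--         if start == end:
--             tree[node] = nums1[start]
--             return
--         mid = (start + end) // 2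
--         build(2 * node, start, mid)
--         build(2 * node + 1, mid + 1, end)
--         tree[node] = tree[2 * node] + tree[2 * node + 1]
--
--     def push_down(node: int, start: int, end: int) -> None:
--         """Propagate lazy toggle to children."""
--         if lazy[node]:
--             mid = (start + end) // 2
--             # Toggle left child
--             tree[2 * node] = (mid - start + 1) - tree[2 * node]
--             lazy[2 * node] ^= 1
--             # Toggle right child
--             tree[2 * node + 1] = (end - mid) - tree[2 * node + 1]
--             lazy[2 * node + 1] ^= 1
--             # Clear lazy flag
--             lazy[node] = 0
--
--     def toggle(node: int, start: int, end: int, l: int, r: int) -> None: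
--         """Toggle all elements in [l, r]."""
--         if r < start or end < l:
--             return
--         if l <= start and end <= r:
--             # Entire segment covered - toggle and mark lazy
--             tree[node] = (end - start + 1) - tree[node]
--             lazy[node] ^= 1
--             return
--         push_down(node, start, end)
--         mid = (start + end) // 2
--         toggle(2 * node, start, mid, l, r)
--         toggle(2 * node + 1, mid + 1, end, l, r)
--         tree[node] = tree[2 * node] + tree[2 * node + 1]
--
--     def query_sum() -> int:
--         """Return total count of 1s in nums1."""
--         return tree[1]
--
--     # Build segment tree
--     build(1, 0, n - 1)
--
--     # Track sum(nums2) - we never need individual elements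
--     sum2 = sum(nums2)
--     result = []
--
--     for q in queries:
--         if q[0] == 1:
--             # Type 1: Toggle nums1[l..r]
--             toggle(1, 0, n - 1, q[1], q[2])
--         elif q[0] == 2:
--             # Type 2: sum2 += p * count_of_ones
--             sum2 += q[1] * query_sum()
--         else:
--             # Type 3: Record sum(nums2)
--             result.append(sum2)
--
--     return result
-- ===== SOURCE B (Python) =====
-- from typing import List
--
-- def handleQuery(
--     nums1: List[int], nums2: List[int], queries: List[List[int]]
-- ) -> List[int]:
--     # Flat array with a running ones-count: toggle [l, r] element by element
--     # (clamped to valid indices), keeping `ones` = sum(arr) incrementally.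
--     arr = list(nums1)
--     n = len(arr)
--     ones = sum(arr)
--     sum2 = sum(nums2)
--     result = []
--     for q in queries:
--         if q[0] == 1:
--             for i in range(max(q[1], 0), min(q[2], n - 1) + 1):
--                 ones += 1 - 2 * arr[i]
--                 arr[i] = 1 - arr[i]
--         elif q[0] == 2:
--             sum2 += q[1] * ones
--         else:
--             result.append(sum2)
--     return result
-- ===== Notes on version B (the rewrite author's own statement) =====
-- stated objective: simpler
-- what changed: Replaces the lazy segment tree (build/push_down/toggle recursion over a 4n-slot array) with a flat copy of nums1 plus a running ones-counter, toggling each clamped range element by element (simpler; measured constant-factor faster on the generated workloads).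
import Mathlib
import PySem

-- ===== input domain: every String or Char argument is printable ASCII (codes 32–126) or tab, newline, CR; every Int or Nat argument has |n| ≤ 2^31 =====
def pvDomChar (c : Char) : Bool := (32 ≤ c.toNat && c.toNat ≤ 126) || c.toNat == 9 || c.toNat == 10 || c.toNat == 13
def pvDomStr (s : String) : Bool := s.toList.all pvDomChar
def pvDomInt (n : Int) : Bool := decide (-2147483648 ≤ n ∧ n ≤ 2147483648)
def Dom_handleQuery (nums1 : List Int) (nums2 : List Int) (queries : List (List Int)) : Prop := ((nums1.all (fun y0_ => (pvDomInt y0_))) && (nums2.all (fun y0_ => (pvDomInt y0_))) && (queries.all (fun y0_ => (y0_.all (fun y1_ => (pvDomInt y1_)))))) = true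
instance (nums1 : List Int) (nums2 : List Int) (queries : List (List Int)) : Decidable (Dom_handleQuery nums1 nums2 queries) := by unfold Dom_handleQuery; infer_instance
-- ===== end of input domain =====

-- B replaces A's lazy segment tree by a flat array with a running ones-count: simpler, and measured constant-factor faster on the generated workloads.

-- ===== PORT A =====
-- Literal port of A's segment tree.  Python's recursion carries no fuel; here each
-- recursive helper takes a fuel argument that, inside Pre_, is never exhausted
-- (the range size shrinks by at least 1 per level).  `lazy[node] ^= 1` is ported
-- as `1 - lazy[node]`, exact on the 0/1 values lazy ever holds.  List reads/writes
-- use getD 0 / set; inside Pre_ every touched index is in range, as in Python.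
def buildA (nums1 : List Int) : Nat → Nat → Nat → Nat → List Int → List Int
  | 0, _, _, _, tree => tree
  | fuel+1, node, s, e, tree =>
    if s = e then tree.set node (nums1.getD s 0)
    else
      let mid := (s+e)/2
      let t1 := buildA nums1 fuel (2*node) s mid tree
      let t2 := buildA nums1 fuel (2*node+1) (mid+1) e t1
      t2.set node (t2.getD (2*node) 0 + t2.getD (2*node+1) 0)

def pushDownA (node s e : Nat) (σ : List Int × List Int) : List Int × List Int :=
  if σ.2.getD node 0 ≠ 0 then
    let mid := (s+e)/2
    let tree1 := σ.1.set (2*node) ((((mid:Int) - (s:Int)) + 1) - σ.1.getD (2*node) 0)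
    let lazy1 := σ.2.set (2*node) (1 - σ.2.getD (2*node) 0)
    let tree2 := tree1.set (2*node+1) (((e:Int) - (mid:Int)) - tree1.getD (2*node+1) 0)
    let lazy2 := lazy1.set (2*node+1) (1 - lazy1.getD (2*node+1) 0)
    (tree2, lazy2.set node 0)
  else σ

def toggleA : Nat → Nat → Nat → Nat → Int → Int → List Int × List Int → List Int × List Int
  | 0, _, _, _, _, _, σ => σ
  | fuel+1, node, s, e, l, r, σ =>
    if r < (s:Int) ∨ (e:Int) < l then σ
    else if l ≤ (s:Int) ∧ (e:Int) ≤ r then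
      (σ.1.set node ((((e:Int) - (s:Int)) + 1) - σ.1.getD node 0),
       σ.2.set node (1 - σ.2.getD node 0))
    else
      let σ1 := pushDownA node s e σ
      let mid := (s+e)/2
      let σ2 := toggleA fuel (2*node) s mid l r σ1
      let σ3 := toggleA fuel (2*node+1) (mid+1) e l r σ2
      (σ3.1.set node (σ3.1.getD (2*node) 0 + σ3.1.getD (2*node+1) 0), σ3.2)

def loopA (n : Nat) : List (List Int) → List Int × List Int → Int → List Int → List Int
  | [], _, _, res => res
  | q :: qs, σ, sum2, res =>
    if q.getD 0 0 = 1 then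
      loopA n qs (toggleA n 1 0 (n-1) (q.getD 1 0) (q.getD 2 0) σ) sum2 res
    else if q.getD 0 0 = 2 then
      loopA n qs σ (sum2 + q.getD 1 0 * σ.1.getD 1 0) res
    else
      loopA n qs σ sum2 (res ++ [sum2])

def handleQuery (nums1 : List Int) (nums2 : List Int) (queries : List (List Int)) : List Int :=
  let n := nums1.length
  let tree := buildA nums1 n 1 0 (n-1) (List.replicate (4*n) 0)
  loopA n queries (tree, List.replicate (4*n) 0) nums2.sum []

-- ===== PORT B =====
-- Literal port of Source B: flat array `arr`, running `ones`; a type-1 query walks the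
-- clamped index range `range(max(l,0), min(r,n-1)+1)` and toggles element by element.
def togB : List Nat → List Int × Int → List Int × Int
  | [], st => st
  | i :: is, (arr, ones) => togB is (arr.set i (1 - arr.getD i 0), ones + (1 - 2 * arr.getD i 0))

def loopB (n : Nat) : List (List Int) → List Int → Int → Int → List Int → List Int
  | [], _, _, _, res => res
  | q :: qs, arr, ones, sum2, res =>
    if q.getD 0 0 = 1 then
      let lo : Nat := (max (q.getD 1 0) 0).toNat
      let hi : Nat := (min (q.getD 2 0) ((n:Int) - 1) + 1).toNat
      let st := togB (List.range' lo (hi - lo)) (arr, ones)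
      loopB n qs st.1 st.2 sum2 res
    else if q.getD 0 0 = 2 then
      loopB n qs arr ones (sum2 + q.getD 1 0 * ones) res
    else
      loopB n qs arr ones sum2 (res ++ [sum2])

def handleQuery_alt (nums1 : List Int) (nums2 : List Int) (queries : List (List Int)) : List Int :=
  loopB nums1.length queries nums1 nums1.sum nums2.sum []

-- ===== PRECONDITION & SPEC =====
-- Pre_ excludes exactly the inputs where Python A raises: empty nums1 (the build
-- recursion never terminates: RecursionError) and malformed queries (q[0]/q[1]/q[2]
-- raise IndexError when the query is shorter than its type requires).
def Pre_handleQuery (nums1 : List Int) (nums2 : List Int) (queries : List (List Int)) : Prop :=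
  nums1 ≠ [] ∧ ∀ q ∈ queries, q ≠ [] ∧ (q.getD 0 0 = 1 → 3 ≤ q.length) ∧ (q.getD 0 0 = 2 → 2 ≤ q.length)
instance (nums1 : List Int) (nums2 : List Int) (queries : List (List Int)) : Decidable (Pre_handleQuery nums1 nums2 queries) := by unfold Pre_handleQuery; infer_instance

def pvWitness_handleQuery : List Int × List Int × List (List Int) :=
  ([1, 0, 1], [2, 5], [[1, 0, 1], [2, 3], [3], [1, 1, 2], [2, -1], [3]])


def Spec_handleQuery (nums1 : List Int) (nums2 : List Int) (queries : List (List Int)) (out : List Int) : Prop := out = handleQuery_alt nums1 nums2 queries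
instance (nums1 : List Int) (nums2 : List Int) (queries : List (List Int)) (out : List Int) : Decidable (Spec_handleQuery nums1 nums2 queries out) := by unfold Spec_handleQuery; infer_instance

-- ===== CLAIM (what is proved, stated in full; the proofs are below) =====
def Claim_equal_handleQuery : Prop := ∀ (nums1 : List Int) (nums2 : List Int) (queries : List (List Int)), Dom_handleQuery nums1 nums2 queries → Pre_handleQuery nums1 nums2 queries → Spec_handleQuery nums1 nums2 queries (handleQuery nums1 nums2 queries)

-- ===== LEMMAS AND PROOFS =====

-- ---- generic list helpers ----
theorem lget_set_ne (xs : List Int) (i j : Nat) (v : Int) (h : i ≠ j) :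
    (xs.set i v).getD j 0 = xs.getD j 0 := by
  simp [List.getD, List.getElem?_set_ne h]


theorem lget_set_self (xs : List Int) (i : Nat) (v : Int) (h : i < xs.length) :
    (xs.set i v).getD i 0 = v := by
  simp [List.getD, h]

theorem sum_set_getD (xs : List Int) (i : Nat) (v : Int) (h : i < xs.length) :
    (xs.set i v).sum = xs.sum + v - xs.getD i 0 := by
  induction xs generalizing i with
  | nil => simp at h
  | cons x xs ih =>
    cases i with
    | zero => simp [List.getD]; ring
    | succ i =>
      simp only [List.set, List.sum_cons, List.getD_cons_succ]
      rw [ih i (by simpa using h)]; ring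

theorem sum_map_one_sub (xs : List Int) :
    (xs.map (fun x => 1 - x)).sum = (xs.length : Int) - xs.sum := by
  induction xs with
  | nil => simp
  | cons x xs ih => simp [ih]; ring

theorem map_one_sub_involutive (xs : List Int) :
    ((xs.map (fun x => 1 - x)).map (fun x => 1 - x)) = xs := by
  induction xs with
  | nil => rfl
  | cons x xs ih => simp [ih]

-- ---- decode / invariants for A's segment tree ----
def decodeT (σ : List Int × List Int) (node s e : Nat) : List Int :=
  if e ≤ s then [σ.1.getD node 0]
  else
    let c := decodeT σ (2*node) s ((s+e)/2) ++ decodeT σ (2*node+1) ((s+e)/2+1) e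
    if σ.2.getD node 0 ≠ 0 then c.map (fun x => 1 - x) else c
termination_by e - s
decreasing_by all_goals omega

def GoodT (σ : List Int × List Int) (node s e : Nat) : Prop :=
  σ.1.getD node 0 = (decodeT σ node s e).sum ∧
  (¬ e ≤ s → GoodT σ (2*node) s ((s+e)/2) ∧ GoodT σ (2*node+1) ((s+e)/2+1) e)
termination_by e - s
decreasing_by all_goals omega

def InSubT (node s e j : Nat) : Prop :=
  j = node ∨ (if e ≤ s then False else (InSubT (2*node) s ((s+e)/2) j ∨ InSubT (2*node+1) ((s+e)/2+1) e j))
termination_by e - s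
decreasing_by all_goals omega

theorem InSubT_iff (node s e j : Nat) : InSubT node s e j ↔
    (j = node ∨ (s < e ∧ (InSubT (2*node) s ((s+e)/2) j ∨ InSubT (2*node+1) ((s+e)/2+1) e j))) := by
  by_cases h : e ≤ s
  · rw [InSubT, if_pos h]
    constructor
    · rintro (h1 | h1)
      · exact Or.inl h1
      · exact h1.elim
    · rintro (h1 | ⟨h2, _⟩)
      · exact Or.inl h1
      · omega
  · rw [InSubT, if_neg h]
    have hs : s < e := by omega
    tauto

def LazyOkT (σ : List Int × List Int) (node s e : Nat) : Prop :=
  ∀ j, InSubT node s e j → σ.2.getD j 0 = 0 ∨ σ.2.getD j 0 = 1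

def flipSegI (l r : Int) : Int → List Int → List Int
  | _, [] => []
  | t, x :: xs => (if l ≤ t ∧ t ≤ r then 1 - x else x) :: flipSegI l r (t+1) xs

theorem InSubT_self (node s e : Nat) : InSubT node s e node := by
  rw [InSubT_iff]; exact Or.inl rfl

theorem InSubT_le (node s e j : Nat) (h : InSubT node s e j) : node ≤ j := by
  rw [InSubT_iff] at h
  rcases h with h | ⟨hse, h | h⟩
  · omega
  · have := InSubT_le (2*node) s ((s+e)/2) j h; omega
  · have := InSubT_le (2*node+1) ((s+e)/2+1) e j h; omega
termination_by e - s
decreasing_by all_goals omega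

theorem InSubT_anc (node s e j : Nat) (h : InSubT node s e j) : ∃ d, j / 2^d = node := by
  rw [InSubT_iff] at h
  rcases h with rfl | ⟨hse, h | h⟩
  · exact ⟨0, by simp⟩
  · obtain ⟨d, hd⟩ := InSubT_anc (2*node) s ((s+e)/2) j h
    refine ⟨d+1, ?_⟩
    rw [pow_succ, ← Nat.div_div_eq_div_mul, hd]
    omega
  · obtain ⟨d, hd⟩ := InSubT_anc (2*node+1) ((s+e)/2+1) e j h
    refine ⟨d+1, ?_⟩
    rw [pow_succ, ← Nat.div_div_eq_div_mul, hd]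
    omega
termination_by e - s
decreasing_by all_goals omega

theorem sib_disj (node s m m' e j : Nat) (hn : 1 ≤ node)
    (h1 : InSubT (2*node) s m j) (h2 : InSubT (2*node+1) m' e j) : False := by
  obtain ⟨a, ha⟩ := InSubT_anc _ _ _ _ h1
  obtain ⟨b, hb⟩ := InSubT_anc _ _ _ _ h2
  rcases le_or_gt a b with hab | hab
  · have hdd : j / 2^b = (j / 2^a) / 2^(b-a) := by
      rw [Nat.div_div_eq_div_mul, ← pow_add, Nat.add_sub_cancel' hab]
    rw [ha, hb] at hdd
    rcases Nat.eq_or_lt_of_le hab with rfl | hlt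
    · rw [Nat.sub_self, pow_zero, Nat.div_one] at hdd
      omega
    · have h2p : 2 ≤ 2^(b-a) := by
        calc 2 = 2^1 := by norm_num
        _ ≤ 2^(b-a) := Nat.pow_le_pow_right (by norm_num) (by omega)
      have : (2*node) / 2^(b-a) ≤ (2*node) / 2 := Nat.div_le_div_left h2p (by norm_num)
      omega
  · have hdd : j / 2^a = (j / 2^b) / 2^(a-b) := by
      rw [Nat.div_div_eq_div_mul, ← pow_add, Nat.add_sub_cancel' (le_of_lt hab)]
    rw [ha, hb] at hdd
    have h2p : 2 ≤ 2^(a-b) := by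
      calc 2 = 2^1 := by norm_num
      _ ≤ 2^(a-b) := Nat.pow_le_pow_right (by norm_num) (by omega)
    have : (2*node+1) / 2^(a-b) ≤ (2*node+1) / 2 := Nat.div_le_div_left h2p (by norm_num)
    omega

theorem decodeT_length (σ : List Int × List Int) (node s e : Nat) (h : s ≤ e) :
    (decodeT σ node s e).length = e + 1 - s := by
  rw [decodeT]
  by_cases hse : e ≤ s
  · simp [hse]
    omega
  · have h1 := decodeT_length σ (2*node) s ((s+e)/2) (by omega)
    have h2 := decodeT_length σ (2*node+1) ((s+e)/2+1) e (by omega)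
    simp only [if_neg hse]
    split <;> simp [h1, h2] <;> omega
termination_by e - s
decreasing_by all_goals omega

theorem decodeT_congr (σ σ' : List Int × List Int) (node s e : Nat)
    (h : ∀ j, InSubT node s e j → σ.1.getD j 0 = σ'.1.getD j 0 ∧ σ.2.getD j 0 = σ'.2.getD j 0) :
    decodeT σ node s e = decodeT σ' node s e := by
  have hnode := h node (InSubT_self node s e)
  rw [decodeT]
  conv_rhs => rw [decodeT]
  by_cases hse : e ≤ s
  · simp only [if_pos hse, hnode.1]
  · have e1 := decodeT_congr σ σ' (2*node) s ((s+e)/2)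
      (fun j hj => h j ((InSubT_iff node s e j).mpr (Or.inr ⟨by omega, Or.inl hj⟩)))
    have e2 := decodeT_congr σ σ' (2*node+1) ((s+e)/2+1) e
      (fun j hj => h j ((InSubT_iff node s e j).mpr (Or.inr ⟨by omega, Or.inr hj⟩)))
    simp only [if_neg hse, e1, e2, hnode.2]
termination_by e - s
decreasing_by all_goals omega

theorem GoodT_congr (σ σ' : List Int × List Int) (node s e : Nat)
    (h : ∀ j, InSubT node s e j → σ.1.getD j 0 = σ'.1.getD j 0 ∧ σ.2.getD j 0 = σ'.2.getD j 0)
    (hg : GoodT σ node s e) : GoodT σ' node s e := by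
  rw [GoodT] at hg ⊢
  refine ⟨?_, ?_⟩
  · rw [← (h node (InSubT_self node s e)).1, ← decodeT_congr σ σ' node s e h]
    exact hg.1
  · intro hse
    obtain ⟨hgl, hgr⟩ := hg.2 hse
    exact ⟨GoodT_congr σ σ' (2*node) s ((s+e)/2)
        (fun j hj => h j ((InSubT_iff node s e j).mpr (Or.inr ⟨by omega, Or.inl hj⟩))) hgl,
      GoodT_congr σ σ' (2*node+1) ((s+e)/2+1) e
        (fun j hj => h j ((InSubT_iff node s e j).mpr (Or.inr ⟨by omega, Or.inr hj⟩))) hgr⟩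
termination_by e - s
decreasing_by all_goals omega

theorem InSubT_bound (node s e j : Nat) (hse : s ≤ e) (h : InSubT node s e j) :
    j < (node+1) * 2^(Nat.clog 2 (e+1-s)) := by
  rw [InSubT_iff] at h
  rcases h with rfl | ⟨hlt, hc | hc⟩
  · have hp : 0 < 2^(Nat.clog 2 (e+1-s)) := Nat.two_pow_pos _
    calc j < j + 1 := Nat.lt_succ_self j
      _ ≤ (j+1) * 2^(Nat.clog 2 (e+1-s)) := Nat.le_mul_of_pos_right _ hp
  · have ih := InSubT_bound (2*node) s ((s+e)/2) j (by omega) hc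
    have h2k : 2 ≤ e+1-s := by omega
    have hrec : Nat.clog 2 (e+1-s) = Nat.clog 2 ((e+1-s+1)/2) + 1 := by
      rw [Nat.clog_of_two_le one_lt_two h2k]
      simp only [show e+1-s+2-1 = e+1-s+1 from by omega]
    have hkl : (s+e)/2 + 1 - s = (e+1-s+1)/2 := by omega
    calc j < (2*node+1+1) * 2^(Nat.clog 2 ((s+e)/2+1-s)) :=
          lt_of_lt_of_le ih (Nat.mul_le_mul_right _ (by omega))
      _ = (node+1) * 2^(Nat.clog 2 (e+1-s)) := by rw [hkl, hrec, pow_succ]; ring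
  · have ih := InSubT_bound (2*node+1) ((s+e)/2+1) e j (by omega) hc
    have h2k : 2 ≤ e+1-s := by omega
    have hrec : Nat.clog 2 (e+1-s) = Nat.clog 2 ((e+1-s+1)/2) + 1 := by
      rw [Nat.clog_of_two_le one_lt_two h2k]
      simp only [show e+1-s+2-1 = e+1-s+1 from by omega]
    have hmono : Nat.clog 2 (e+1-((s+e)/2+1)) ≤ Nat.clog 2 ((e+1-s+1)/2) :=
      Nat.clog_mono_right 2 (by omega)
    calc j < (2*node+1+1) * 2^(Nat.clog 2 (e+1-((s+e)/2+1))) := ih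
      _ ≤ (2*node+2) * 2^(Nat.clog 2 ((e+1-s+1)/2)) :=
          Nat.mul_le_mul (by omega) (Nat.pow_le_pow_right (by norm_num) hmono)
      _ = (node+1) * 2^(Nat.clog 2 (e+1-s)) := by rw [hrec, pow_succ]; ring
termination_by e - s
decreasing_by all_goals omega

theorem rootBound (n j : Nat) (hn : 1 ≤ n) (h : InSubT 1 0 (n-1) j) : j < 4*n := by
  have hb := InSubT_bound 1 0 (n-1) j (by omega) h
  have hn' : n - 1 + 1 - 0 = n := by omega
  rw [hn'] at hb
  by_cases h1 : n = 1
  · subst h1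
    rw [Nat.clog_one_right] at hb
    norm_num at hb
    omega
  · have h2 : 2 ≤ n := by omega
    have hp : 2^(Nat.clog 2 n - 1) < n := by
      have := Nat.pow_pred_clog_lt_self (b := 2) one_lt_two (x := n) (by omega)
      simpa [Nat.pred_eq_sub_one] using this
    have hpos : 0 < Nat.clog 2 n := Nat.clog_pos one_lt_two (by omega)
    have hsplit : 2^(Nat.clog 2 n) = 2 * 2^(Nat.clog 2 n - 1) := by
      conv_lhs => rw [show Nat.clog 2 n = (Nat.clog 2 n - 1) + 1 from by omega]
      rw [pow_succ]
      ring
    omega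

-- ---- flipSegI lemmas ----
theorem flipSegI_length (l r : Int) (t : Int) (xs : List Int) :
    (flipSegI l r t xs).length = xs.length := by
  induction xs generalizing t with
  | nil => rfl
  | cons x xs ih => simp [flipSegI, ih]

theorem flipSegI_getElem (l r : Int) (t : Int) (xs : List Int) (k : Nat) (hk : k < xs.length) :
    (flipSegI l r t xs)[k]'(by rw [flipSegI_length]; exact hk) =
      if l ≤ t + k ∧ t + k ≤ r then 1 - xs[k] else xs[k] := by
  induction xs generalizing t k with
  | nil => simp at hk
  | cons x xs ih =>
    cases k with
    | zero => simp [flipSegI]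
    | succ k =>
      simp only [flipSegI, List.getElem_cons_succ]
      rw [ih _ _ (by simpa using hk)]
      have hc : t + 1 + (k : Int) = t + ((k : Nat) + 1 : Nat) := by push_cast; ring
      rw [hc]

theorem flipSegI_append (l r : Int) (t : Int) (xs ys : List Int) :
    flipSegI l r t (xs ++ ys) = flipSegI l r t xs ++ flipSegI l r (t + xs.length) ys := by
  induction xs generalizing t with
  | nil => simp [flipSegI]
  | cons x xs ih =>
    simp only [List.cons_append, flipSegI, ih, List.length_cons]
    congr 2
    push_cast; ring

theorem flipSegI_none (l r : Int) (t : Int) (xs : List Int)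
    (h : ∀ k : Nat, k < xs.length → ¬ (l ≤ t + k ∧ t + k ≤ r)) :
    flipSegI l r t xs = xs := by
  induction xs generalizing t with
  | nil => rfl
  | cons x xs ih =>
    have h0 : ¬ (l ≤ t ∧ t ≤ r) := by
      have := h 0 (by simp); push_cast at this; simpa using this
    simp only [flipSegI, if_neg h0]
    rw [ih]
    intro k hk
    have := h (k+1) (by simpa using Nat.succ_lt_succ hk)
    push_cast at this ⊢
    intro hc; exact this (by constructor <;> linarith [hc.1, hc.2])

theorem flipSegI_all (l r : Int) (t : Int) (xs : List Int)
    (h : ∀ k : Nat, k < xs.length → (l ≤ t + k ∧ t + k ≤ r)) :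
    flipSegI l r t xs = xs.map (fun x => 1 - x) := by
  induction xs generalizing t with
  | nil => rfl
  | cons x xs ih =>
    have h0 : l ≤ t ∧ t ≤ r := by
      have := h 0 (by simp); push_cast at this; simpa using this
    simp only [flipSegI, if_pos h0, List.map_cons]
    rw [ih]
    intro k hk
    have := h (k+1) (by simpa using Nat.succ_lt_succ hk)
    push_cast at this ⊢
    exact ⟨by linarith [this.1], by linarith [this.2]⟩


-- agreement of two states on a subtree, specialized
theorem sub_agree_set (σ : List Int × List Int) (c' s' e' c : Nat) (v w : Int)
    (hlt : c < c') :
    ∀ j, InSubT c' s' e' j →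
      σ.1.getD j 0 = (σ.1.set c v).getD j 0 ∧ σ.2.getD j 0 = (σ.2.set c w).getD j 0 := by
  intro j hj
  have := InSubT_le _ _ _ _ hj
  have hne : c ≠ j := by omega
  exact ⟨(lget_set_ne _ _ _ _ hne).symm, (lget_set_ne _ _ _ _ hne).symm⟩

theorem flipRoot (σ : List Int × List Int) (c s e : Nat) (hc : 1 ≤ c) (hse : s ≤ e)
    (h1 : c < σ.1.length) (h2 : c < σ.2.length)
    (hlz : σ.2.getD c 0 = 0 ∨ σ.2.getD c 0 = 1) :
    decodeT (σ.1.set c ((((e:Int) - (s:Int)) + 1) - σ.1.getD c 0), σ.2.set c (1 - σ.2.getD c 0)) c s e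
      = (decodeT σ c s e).map (fun x => 1 - x) ∧
    (GoodT σ c s e →
      GoodT (σ.1.set c ((((e:Int) - (s:Int)) + 1) - σ.1.getD c 0), σ.2.set c (1 - σ.2.getD c 0)) c s e) := by
  have hagL : ∀ j, InSubT (2*c) s ((s+e)/2) j →
      σ.1.getD j 0 = (σ.1.set c ((((e:Int) - (s:Int)) + 1) - σ.1.getD c 0)).getD j 0 ∧
      σ.2.getD j 0 = (σ.2.set c (1 - σ.2.getD c 0)).getD j 0 :=
    sub_agree_set σ (2*c) s ((s+e)/2) c _ _ (by omega)
  have hagR : ∀ j, InSubT (2*c+1) ((s+e)/2+1) e j →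
      σ.1.getD j 0 = (σ.1.set c ((((e:Int) - (s:Int)) + 1) - σ.1.getD c 0)).getD j 0 ∧
      σ.2.getD j 0 = (σ.2.set c (1 - σ.2.getD c 0)).getD j 0 :=
    sub_agree_set σ (2*c+1) ((s+e)/2+1) e c _ _ (by omega)
  have htc : (σ.1.set c ((((e:Int) - (s:Int)) + 1) - σ.1.getD c 0)).getD c 0
      = (((e:Int) - (s:Int)) + 1) - σ.1.getD c 0 := lget_set_self _ _ _ h1
  have hwc : (σ.2.set c (1 - σ.2.getD c 0)).getD c 0 = 1 - σ.2.getD c 0 := lget_set_self _ _ _ h2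
  have hdec : decodeT (σ.1.set c ((((e:Int) - (s:Int)) + 1) - σ.1.getD c 0), σ.2.set c (1 - σ.2.getD c 0)) c s e
      = (decodeT σ c s e).map (fun x => 1 - x) := by
    by_cases hleaf : e ≤ s
    · have hes : e = s := le_antisymm hleaf hse
      subst hes
      rw [decodeT]
      conv_rhs => rw [decodeT]
      rw [if_pos le_rfl, if_pos le_rfl]
      simp only [List.map_cons, List.map_nil, htc]
      congr 1
      push_cast
      ring
    · have hL : decodeT (σ.1.set c ((((e:Int) - (s:Int)) + 1) - σ.1.getD c 0), σ.2.set c (1 - σ.2.getD c 0)) (2*c) s ((s+e)/2)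
          = decodeT σ (2*c) s ((s+e)/2) :=
        (decodeT_congr _ _ _ _ _ hagL).symm
      have hR : decodeT (σ.1.set c ((((e:Int) - (s:Int)) + 1) - σ.1.getD c 0), σ.2.set c (1 - σ.2.getD c 0)) (2*c+1) ((s+e)/2+1) e
          = decodeT σ (2*c+1) ((s+e)/2+1) e :=
        (decodeT_congr _ _ _ _ _ hagR).symm
      rw [decodeT]
      conv_rhs => rw [decodeT]
      rw [if_neg hleaf, if_neg hleaf]
      rcases hlz with h0 | h1'
      · rw [if_pos (by rw [hwc, h0]; norm_num), if_neg (by rw [h0]; norm_num), hL, hR]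
      · rw [if_neg (by rw [hwc, h1']; norm_num), if_pos (by rw [h1']; norm_num), hL, hR,
          map_one_sub_involutive]
  refine ⟨hdec, fun hg => ?_⟩
  rw [GoodT] at hg ⊢
  constructor
  · rw [htc, hdec, sum_map_one_sub, decodeT_length _ _ _ _ hse, ← hg.1]
    have hcast : ((e + 1 - s : Nat) : Int) = ((e:Int) - (s:Int)) + 1 := by omega
    rw [hcast]
  · intro hse'
    obtain ⟨hgl, hgr⟩ := hg.2 hse'
    exact ⟨GoodT_congr _ _ _ _ _ hagL hgl, GoodT_congr _ _ _ _ _ hagR hgr⟩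

theorem pushDown_ok (σ : List Int × List Int) (node s e : Nat) (hn : 1 ≤ node) (hse : s < e)
    (hb : ∀ j, InSubT node s e j → j < σ.1.length ∧ j < σ.2.length)
    (hg : GoodT σ node s e) (hl : LazyOkT σ node s e) :
    (pushDownA node s e σ).1.length = σ.1.length ∧
    (pushDownA node s e σ).2.length = σ.2.length ∧
    (∀ j, ¬ InSubT node s e j → (pushDownA node s e σ).1.getD j 0 = σ.1.getD j 0 ∧
        (pushDownA node s e σ).2.getD j 0 = σ.2.getD j 0) ∧
    (pushDownA node s e σ).2.getD node 0 = 0 ∧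
    decodeT (pushDownA node s e σ) node s e = decodeT σ node s e ∧
    GoodT (pushDownA node s e σ) node s e ∧
    LazyOkT (pushDownA node s e σ) node s e := by
  have hmemn : InSubT node s e node := InSubT_self _ _ _
  have hmem2n : InSubT node s e (2*node) :=
    (InSubT_iff node s e _).mpr (Or.inr ⟨hse, Or.inl (InSubT_self _ _ _)⟩)
  have hmem2n1 : InSubT node s e (2*node+1) :=
    (InSubT_iff node s e _).mpr (Or.inr ⟨hse, Or.inr (InSubT_self _ _ _)⟩)
  have hsubL : ∀ j, InSubT (2*node) s ((s+e)/2) j → InSubT node s e j :=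
    fun j hj => (InSubT_iff node s e j).mpr (Or.inr ⟨hse, Or.inl hj⟩)
  have hsubR : ∀ j, InSubT (2*node+1) ((s+e)/2+1) e j → InSubT node s e j :=
    fun j hj => (InSubT_iff node s e j).mpr (Or.inr ⟨hse, Or.inr hj⟩)
  have hLlo : ∀ j, InSubT (2*node) s ((s+e)/2) j → 2*node ≤ j := fun j hj => InSubT_le _ _ _ _ hj
  have hRlo : ∀ j, InSubT (2*node+1) ((s+e)/2+1) e j → 2*node+1 ≤ j := fun j hj => InSubT_le _ _ _ _ hj
  have hnleaf : ¬ e ≤ s := by omega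
  by_cases hz : σ.2.getD node 0 ≠ 0
  case neg =>
    push_neg at hz
    rw [pushDownA, if_neg (by simpa using hz)]
    exact ⟨rfl, rfl, fun j _ => ⟨rfl, rfl⟩, hz, rfl, hg, hl⟩
  case pos =>
    have hz1 : σ.2.getD node 0 = 1 := by rcases hl node hmemn with h | h; exacts [absurd h hz, h]
    have hPeq : pushDownA node s e σ =
        ((σ.1.set (2*node) ((((((s+e)/2 : Nat):Int) - (s:Int)) + 1) - σ.1.getD (2*node) 0)).set (2*node+1)
            (((e:Int) - (((s+e)/2 : Nat):Int)) -
              (σ.1.set (2*node) ((((((s+e)/2 : Nat):Int) - (s:Int)) + 1) - σ.1.getD (2*node) 0)).getD (2*node+1) 0),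
         ((σ.2.set (2*node) (1 - σ.2.getD (2*node) 0)).set (2*node+1)
            (1 - (σ.2.set (2*node) (1 - σ.2.getD (2*node) 0)).getD (2*node+1) 0)).set node 0) := by
      rw [pushDownA, if_pos hz]
    -- the left-flipped state σL and the fully flipped state σR
    set σL : List Int × List Int :=
      (σ.1.set (2*node) ((((((s+e)/2 : Nat):Int) - (s:Int)) + 1) - σ.1.getD (2*node) 0),
       σ.2.set (2*node) (1 - σ.2.getD (2*node) 0)) with hσL
    have FL := flipRoot σ (2*node) s ((s+e)/2) (by omega) (by omega)
      (hb _ hmem2n).1 (hb _ hmem2n).2 (hl _ hmem2n)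
    have hL1len : σL.1.length = σ.1.length := by simp [hσL]
    have hL2len : σL.2.length = σ.2.length := by simp [hσL]
    have hLget1 : σL.1.getD (2*node+1) 0 = σ.1.getD (2*node+1) 0 :=
      lget_set_ne _ _ _ _ (by omega)
    have hLget2 : σL.2.getD (2*node+1) 0 = σ.2.getD (2*node+1) 0 :=
      lget_set_ne _ _ _ _ (by omega)
    have hval : ((e:Int) - (((s+e)/2 : Nat):Int)) - σL.1.getD (2*node+1) 0
        = ((((e:Int) - ((((s+e)/2+1 : Nat)):Int)) + 1) - σL.1.getD (2*node+1) 0) := by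
      push_cast; ring
    have FR := flipRoot σL (2*node+1) ((s+e)/2+1) e (by omega) (by omega)
      (by rw [hL1len]; exact (hb _ hmem2n1).1) (by rw [hL2len]; exact (hb _ hmem2n1).2)
      (by rw [hLget2]; exact hl _ hmem2n1)
    set σR : List Int × List Int :=
      (σL.1.set (2*node+1) ((((e:Int) - ((((s+e)/2+1 : Nat)):Int)) + 1) - σL.1.getD (2*node+1) 0),
       σL.2.set (2*node+1) (1 - σL.2.getD (2*node+1) 0)) with hσR
    have hPeq2 : pushDownA node s e σ = (σR.1, σR.2.set node 0) := by
      rw [hPeq, hσR, hσL, hval]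
    -- congruences between the intermediate states on the two child subtrees
    have hagLR : ∀ j, InSubT (2*node) s ((s+e)/2) j →
        σL.1.getD j 0 = σR.1.getD j 0 ∧ σL.2.getD j 0 = σR.2.getD j 0 := by
      intro j hj
      have hne : 2*node+1 ≠ j := fun hcon =>
        sib_disj node s ((s+e)/2) ((s+e)/2+1) e j hn hj (hcon ▸ InSubT_self _ _ _)
      exact ⟨(lget_set_ne _ _ _ _ hne).symm, (lget_set_ne _ _ _ _ hne).symm⟩
    have hagRP : ∀ c' s' e', 2*node ≤ c' → (∀ j, InSubT c' s' e' j →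
        σR.1.getD j 0 = (σR.1, σR.2.set node 0).1.getD j 0 ∧
        σR.2.getD j 0 = (σR.2.set node 0).getD j 0) := by
      intro c' s' e' hc' j hj
      have := InSubT_le _ _ _ _ hj
      exact ⟨rfl, (lget_set_ne _ _ _ _ (by omega)).symm⟩
    have hagσσL : ∀ j, InSubT (2*node+1) ((s+e)/2+1) e j →
        σ.1.getD j 0 = σL.1.getD j 0 ∧ σ.2.getD j 0 = σL.2.getD j 0 :=
      sub_agree_set σ (2*node+1) ((s+e)/2+1) e (2*node) _ _ (by omega)
    -- decode of the result's children
    have hdecL : decodeT (σR.1, σR.2.set node 0) (2*node) s ((s+e)/2)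
        = (decodeT σ (2*node) s ((s+e)/2)).map (fun x => 1 - x) := by
      rw [← decodeT_congr σR _ _ _ _ (hagRP (2*node) s ((s+e)/2) le_rfl),
          ← decodeT_congr σL σR _ _ _ hagLR]
      exact FL.1
    have hdecR : decodeT (σR.1, σR.2.set node 0) (2*node+1) ((s+e)/2+1) e
        = (decodeT σ (2*node+1) ((s+e)/2+1) e).map (fun x => 1 - x) := by
      rw [← decodeT_congr σR _ _ _ _ (hagRP (2*node+1) ((s+e)/2+1) e (by omega)), FR.1,
          ← decodeT_congr σ σL _ _ _ hagσσL]
    -- bookkeeping getD facts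
    have hn2n : node ≠ 2*node := by omega
    have hn2n1 : node ≠ 2*node+1 := by omega
    have hP1node : (σR.1, σR.2.set node 0).1.getD node 0 = σ.1.getD node 0 := by
      show σR.1.getD node 0 = _
      rw [hσR]
      rw [lget_set_ne _ _ _ _ (by omega : 2*node+1 ≠ node)]
      rw [hσL]
      exact lget_set_ne _ _ _ _ (by omega : 2*node ≠ node)
    have hP2node : (σR.2.set node 0).getD node 0 = 0 :=
      lget_set_self _ _ _ (by
        rw [hσR]
        simp only [List.length_set]
        rw [hσL]
        simp only [List.length_set]
        exact (hb _ hmemn).2)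
    have hdecP : decodeT (σR.1, σR.2.set node 0) node s e = decodeT σ node s e := by
      rw [decodeT]
      conv_rhs => rw [decodeT]
      rw [if_neg hnleaf, if_neg hnleaf]
      rw [if_neg (by show ¬ ((σR.2.set node 0).getD node 0 ≠ 0); rw [hP2node]; norm_num)]
      rw [if_pos (by rw [hz1]; norm_num)]
      show decodeT (σR.1, σR.2.set node 0) (2*node) s ((s+e)/2) ++
          decodeT (σR.1, σR.2.set node 0) (2*node+1) ((s+e)/2+1) e = _
      rw [hdecL, hdecR, ← List.map_append]
    refine ⟨?_, ?_, ?_, ?_, ?_, ?_, ?_⟩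
    · rw [hPeq2, hσR, hσL]; simp
    · rw [hPeq2, hσR, hσL]; simp
    · intro j hj
      have hjn : node ≠ j := fun h => hj (h ▸ hmemn)
      have hj2n : 2*node ≠ j := fun h => hj (h ▸ hmem2n)
      have hj2n1 : 2*node+1 ≠ j := fun h => hj (h ▸ hmem2n1)
      rw [hPeq2]
      constructor
      · show σR.1.getD j 0 = _
        rw [hσR, lget_set_ne _ _ _ _ hj2n1, hσL, lget_set_ne _ _ _ _ hj2n]
      · show (σR.2.set node 0).getD j 0 = _
        rw [lget_set_ne _ _ _ _ hjn, hσR, lget_set_ne _ _ _ _ hj2n1, hσL,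
          lget_set_ne _ _ _ _ hj2n]
    · rw [hPeq2]; exact hP2node
    · rw [hPeq2]; exact hdecP
    · rw [hPeq2, GoodT]
      have hg' := hg
      rw [GoodT] at hg'
      have hGL : GoodT σR (2*node) s ((s+e)/2) :=
        GoodT_congr σL σR _ _ _ hagLR (FL.2 (hg'.2 hnleaf).1)
      have hGR : GoodT σR (2*node+1) ((s+e)/2+1) e :=
        FR.2 (GoodT_congr σ σL _ _ _ hagσσL (hg'.2 hnleaf).2)
      refine ⟨?_, fun _ => ⟨?_, ?_⟩⟩
      · rw [hP1node, hdecP]; exact hg'.1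
      · exact GoodT_congr σR _ _ _ _ (hagRP (2*node) s ((s+e)/2) le_rfl) hGL
      · exact GoodT_congr σR _ _ _ _ (hagRP (2*node+1) ((s+e)/2+1) e (by omega)) hGR
    · rw [hPeq2]
      intro j hj
      show (σR.2.set node 0).getD j 0 = 0 ∨ (σR.2.set node 0).getD j 0 = 1
      by_cases hjn : j = node
      · subst hjn; exact Or.inl hP2node
      by_cases hj2n : j = 2*node
      · subst hj2n
        rw [lget_set_ne _ _ _ _ (by omega : node ≠ 2*node), hσR,
          lget_set_ne _ _ _ _ (by omega : 2*node+1 ≠ 2*node), hσL,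
          lget_set_self _ _ _ (hb _ hmem2n).2]
        rcases hl _ hmem2n with h | h <;> rw [h] <;> norm_num
      by_cases hj2n1 : j = 2*node+1
      · subst hj2n1
        rw [lget_set_ne _ _ _ _ (by omega : node ≠ 2*node+1), hσR,
          lget_set_self _ _ _ (by rw [hL2len]; exact (hb _ hmem2n1).2), hLget2]
        rcases hl _ hmem2n1 with h | h <;> rw [h] <;> norm_num
      · rw [lget_set_ne _ _ _ _ (by omega : node ≠ j), hσR,
          lget_set_ne _ _ _ _ (by omega : 2*node+1 ≠ j), hσL,
          lget_set_ne _ _ _ _ (by omega : 2*node ≠ j)]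
        exact hl j hj

theorem GoodT_sum (σ : List Int × List Int) (node s e : Nat) (h : GoodT σ node s e) :
    σ.1.getD node 0 = (decodeT σ node s e).sum := by
  rw [GoodT] at h; exact h.1

theorem GoodT_children (σ : List Int × List Int) (node s e : Nat) (h : GoodT σ node s e)
    (hse : ¬ e ≤ s) : GoodT σ (2*node) s ((s+e)/2) ∧ GoodT σ (2*node+1) ((s+e)/2+1) e := by
  rw [GoodT] at h; exact h.2 hse

theorem GoodT_intro (σ : List Int × List Int) (node s e : Nat)
    (h1 : σ.1.getD node 0 = (decodeT σ node s e).sum)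
    (h2 : ¬ e ≤ s → GoodT σ (2*node) s ((s+e)/2) ∧ GoodT σ (2*node+1) ((s+e)/2+1) e) :
    GoodT σ node s e := by
  rw [GoodT]; exact ⟨h1, h2⟩

theorem toggle_ok (l r : Int) : ∀ (fe node s e : Nat) (σ : List Int × List Int),
    s ≤ e → e + 1 - s ≤ fe → 1 ≤ node →
    (∀ j, InSubT node s e j → j < σ.1.length ∧ j < σ.2.length) →
    GoodT σ node s e → LazyOkT σ node s e →
    (toggleA fe node s e l r σ).1.length = σ.1.length ∧
    (toggleA fe node s e l r σ).2.length = σ.2.length ∧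
    (∀ j, ¬ InSubT node s e j → (toggleA fe node s e l r σ).1.getD j 0 = σ.1.getD j 0 ∧
        (toggleA fe node s e l r σ).2.getD j 0 = σ.2.getD j 0) ∧
    GoodT (toggleA fe node s e l r σ) node s e ∧
    LazyOkT (toggleA fe node s e l r σ) node s e ∧
    decodeT (toggleA fe node s e l r σ) node s e = flipSegI l r (s:Int) (decodeT σ node s e) := by
  intro fe
  induction fe with
  | zero => intro node s e σ hse hfe hn hb hg hl; omega
  | succ fe ih =>
    intro node s e σ hse hfe hn hb hg hl
    by_cases hdis : r < (s:Int) ∨ (e:Int) < l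
    · rw [toggleA, if_pos hdis]
      refine ⟨rfl, rfl, fun j _ => ⟨rfl, rfl⟩, hg, hl, ?_⟩
      exact (flipSegI_none l r (s:Int) (decodeT σ node s e)
        (by intro k hk; rw [decodeT_length _ _ _ _ hse] at hk; omega)).symm
    · by_cases hcov : l ≤ (s:Int) ∧ (e:Int) ≤ r
      · rw [toggleA, if_neg hdis, if_pos hcov]
        have FL := flipRoot σ node s e hn hse (hb node (InSubT_self _ _ _)).1
          (hb node (InSubT_self _ _ _)).2 (hl node (InSubT_self _ _ _))
        refine ⟨by simp, by simp, ?_, FL.2 hg, ?_, ?_⟩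
        · intro j hj
          have hne : node ≠ j := fun h => hj (h ▸ InSubT_self _ _ _)
          exact ⟨lget_set_ne _ _ _ _ hne, lget_set_ne _ _ _ _ hne⟩
        · intro j hj
          by_cases hjn : j = node
          · subst hjn
            show (σ.2.set j (1 - σ.2.getD j 0)).getD j 0 = 0 ∨ _ = 1
            rw [lget_set_self _ _ _ (hb j hj).2]
            rcases hl j hj with h | h <;> rw [h] <;> norm_num
          · show (σ.2.set node (1 - σ.2.getD node 0)).getD j 0 = 0 ∨ _ = 1
            rw [lget_set_ne _ _ _ _ (fun h => hjn h.symm)]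
            exact hl j hj
        · rw [FL.1]
          exact (flipSegI_all l r (s:Int) (decodeT σ node s e)
            (by intro k hk; rw [decodeT_length _ _ _ _ hse] at hk; omega)).symm
      · -- partial overlap: push down, recurse into both children, recombine
        have hse' : s < e := by
          rcases Nat.lt_or_ge s e with h | h
          · exact h
          · exfalso
            have hes : e = s := by omega
            subst hes
            push_neg at hdis
            exact hcov ⟨by omega, by omega⟩
        have hnleaf : ¬ e ≤ s := by omega
        have hsubL : ∀ j, InSubT (2*node) s ((s+e)/2) j → InSubT node s e j :=
          fun j hj => (InSubT_iff node s e j).mpr (Or.inr ⟨hse', Or.inl hj⟩)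
        have hsubR : ∀ j, InSubT (2*node+1) ((s+e)/2+1) e j → InSubT node s e j :=
          fun j hj => (InSubT_iff node s e j).mpr (Or.inr ⟨hse', Or.inr hj⟩)
        obtain ⟨P1len1, P1len2, P1frame, P1lz, P1dec, P1good, P1lok⟩ :=
          pushDown_ok σ node s e hn hse' hb hg hl
        have hgch := GoodT_children _ _ _ _ P1good hnleaf
        have hbL : ∀ j, InSubT (2*node) s ((s+e)/2) j →
            j < (pushDownA node s e σ).1.length ∧ j < (pushDownA node s e σ).2.length :=
          fun j hj => by rw [P1len1, P1len2]; exact hb j (hsubL j hj)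
        obtain ⟨L1, L2, Lframe, Lgood, Llok, Ldec⟩ :=
          ih (2*node) s ((s+e)/2) (pushDownA node s e σ) (by omega) (by omega) (by omega)
            hbL hgch.1 (fun j hj => P1lok j (hsubL j hj))
        have hag12R : ∀ j, InSubT (2*node+1) ((s+e)/2+1) e j →
            (pushDownA node s e σ).1.getD j 0
              = (toggleA fe (2*node) s ((s+e)/2) l r (pushDownA node s e σ)).1.getD j 0 ∧
            (pushDownA node s e σ).2.getD j 0
              = (toggleA fe (2*node) s ((s+e)/2) l r (pushDownA node s e σ)).2.getD j 0 := by
          intro j hj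
          have hnotL : ¬ InSubT (2*node) s ((s+e)/2) j :=
            fun hc => sib_disj node s ((s+e)/2) ((s+e)/2+1) e j hn hc hj
          exact ⟨(Lframe j hnotL).1.symm, (Lframe j hnotL).2.symm⟩
        have hbR : ∀ j, InSubT (2*node+1) ((s+e)/2+1) e j →
            j < (toggleA fe (2*node) s ((s+e)/2) l r (pushDownA node s e σ)).1.length ∧
            j < (toggleA fe (2*node) s ((s+e)/2) l r (pushDownA node s e σ)).2.length :=
          fun j hj => by rw [L1, L2, P1len1, P1len2]; exact hb j (hsubR j hj)
        obtain ⟨R1, R2, Rframe, Rgood, Rlok, Rdec⟩ :=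
          ih (2*node+1) ((s+e)/2+1) e (toggleA fe (2*node) s ((s+e)/2) l r (pushDownA node s e σ))
            (by omega) (by omega) (by omega) hbR
            (GoodT_congr _ _ _ _ _ hag12R hgch.2)
            (fun j hj => by rw [← (hag12R j hj).2]; exact P1lok j (hsubR j hj))
        set σ1 := pushDownA node s e σ with hσ1
        set σ2 := toggleA fe (2*node) s ((s+e)/2) l r σ1 with hσ2
        set σ3 := toggleA fe (2*node+1) ((s+e)/2+1) e l r σ2 with hσ3
        have hag23L : ∀ j, InSubT (2*node) s ((s+e)/2) j →
            σ2.1.getD j 0 = σ3.1.getD j 0 ∧ σ2.2.getD j 0 = σ3.2.getD j 0 := by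
          intro j hj
          have hnotR : ¬ InSubT (2*node+1) ((s+e)/2+1) e j :=
            fun hc => sib_disj node s ((s+e)/2) ((s+e)/2+1) e j hn hj hc
          exact ⟨(Rframe j hnotR).1.symm, (Rframe j hnotR).2.symm⟩
        have hGl3 : GoodT σ3 (2*node) s ((s+e)/2) := GoodT_congr _ _ _ _ _ hag23L Lgood
        have hnotLnode : ¬ InSubT (2*node) s ((s+e)/2) node :=
          fun hc => by have := InSubT_le _ _ _ _ hc; omega
        have hnotRnode : ¬ InSubT (2*node+1) ((s+e)/2+1) e node :=
          fun hc => by have := InSubT_le _ _ _ _ hc; omega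
        have hlz3 : σ3.2.getD node 0 = 0 := by
          rw [(Rframe node hnotRnode).2, (Lframe node hnotLnode).2]
          exact P1lz
        have hteq : toggleA (fe+1) node s e l r σ
            = (σ3.1.set node (σ3.1.getD (2*node) 0 + σ3.1.getD (2*node+1) 0), σ3.2) := by
          rw [toggleA, if_neg hdis, if_neg hcov]
        set σP : List Int × List Int :=
          (σ3.1.set node (σ3.1.getD (2*node) 0 + σ3.1.getD (2*node+1) 0), σ3.2) with hσP
        have hag3P : ∀ (c' s' e' : Nat), 2*node ≤ c' → ∀ j, InSubT c' s' e' j →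
            σ3.1.getD j 0 = σP.1.getD j 0 ∧ σ3.2.getD j 0 = σP.2.getD j 0 := by
          intro c' s' e' hc' j hj
          have := InSubT_le _ _ _ _ hj
          exact ⟨(lget_set_ne _ _ _ _ (by omega : node ≠ j)).symm, rfl⟩
        have decPL : decodeT σP (2*node) s ((s+e)/2)
            = flipSegI l r (s:Int) (decodeT σ1 (2*node) s ((s+e)/2)) := by
          rw [← decodeT_congr σ3 σP _ _ _ (hag3P (2*node) s ((s+e)/2) le_rfl),
            ← decodeT_congr σ2 σ3 _ _ _ hag23L]
          exact Ldec
        have decPR : decodeT σP (2*node+1) ((s+e)/2+1) e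
            = flipSegI l r ((((s+e)/2+1 : Nat)):Int) (decodeT σ1 (2*node+1) ((s+e)/2+1) e) := by
          rw [← decodeT_congr σ3 σP _ _ _ (hag3P (2*node+1) ((s+e)/2+1) e (by omega)), Rdec,
            ← decodeT_congr σ1 σ2 _ _ _ hag12R]
        have hlzP : ¬ (σP.2.getD node 0 ≠ 0) := by
          show ¬ (σ3.2.getD node 0 ≠ 0)
          rw [hlz3]; norm_num
        have hlz1' : ¬ (σ1.2.getD node 0 ≠ 0) := by rw [P1lz]; norm_num
        have hdecsplit : decodeT σP node s e
            = decodeT σP (2*node) s ((s+e)/2) ++ decodeT σP (2*node+1) ((s+e)/2+1) e := by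
          rw [decodeT, if_neg hnleaf, if_neg hlzP]
        have hdecP : decodeT σP node s e = flipSegI l r (s:Int) (decodeT σ node s e) := by
          rw [hdecsplit, decPL, decPR, ← P1dec]
          conv_rhs => rw [decodeT, if_neg hnleaf, if_neg hlz1']
          rw [flipSegI_append]
          congr 1
          rw [decodeT_length _ _ _ _ (by omega : s ≤ (s+e)/2)]
          congr 1
          omega
        have hnodelen3 : node < σ3.1.length ∧ node < σ3.2.length := by
          rw [R1, L1, P1len1, R2, L2, P1len2]
          exact hb node (InSubT_self _ _ _)
        have hGP : GoodT σP node s e := by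
          refine GoodT_intro _ _ _ _ ?_ ?_
          · show (σ3.1.set node _).getD node 0 = _
            rw [lget_set_self _ _ _ hnodelen3.1, hdecsplit, List.sum_append]
            congr 1
            · rw [GoodT_sum _ _ _ _ hGl3,
                decodeT_congr σ3 σP _ _ _ (hag3P (2*node) s ((s+e)/2) le_rfl)]
            · rw [GoodT_sum _ _ _ _ Rgood,
                decodeT_congr σ3 σP _ _ _ (hag3P (2*node+1) ((s+e)/2+1) e (by omega))]
          · intro _
            exact ⟨GoodT_congr σ3 σP _ _ _ (hag3P (2*node) s ((s+e)/2) le_rfl) hGl3,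
              GoodT_congr σ3 σP _ _ _ (hag3P (2*node+1) ((s+e)/2+1) e (by omega)) Rgood⟩
        have hLokP : LazyOkT σP node s e := by
          intro j hj
          rw [InSubT_iff] at hj
          rcases hj with rfl | ⟨_, hj | hj⟩
          · exact Or.inl hlz3
          · show σ3.2.getD j 0 = 0 ∨ σ3.2.getD j 0 = 1
            rw [← (hag23L j hj).2]
            exact Llok j hj
          · exact Rlok j hj
        rw [hteq]
        refine ⟨?_, ?_, ?_, hGP, hLokP, hdecP⟩
        · show (σ3.1.set node _).length = _
          rw [List.length_set, R1, L1, P1len1]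
        · show σ3.2.length = _
          rw [R2, L2, P1len2]
        · intro j hj
          have hjn : node ≠ j := fun h => hj (h ▸ InSubT_self _ _ _)
          have hjL : ¬ InSubT (2*node) s ((s+e)/2) j := fun h => hj (hsubL j h)
          have hjR : ¬ InSubT (2*node+1) ((s+e)/2+1) e j := fun h => hj (hsubR j h)
          constructor
          · show (σ3.1.set node _).getD j 0 = _
            rw [lget_set_ne _ _ _ _ hjn, (Rframe j hjR).1, (Lframe j hjL).1]
            exact (P1frame j hj).1
          · show σ3.2.getD j 0 = _
            rw [(Rframe j hjR).2, (Lframe j hjL).2]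
            exact (P1frame j hj).2

theorem replicate_getD (k j : Nat) : (List.replicate k (0:Int)).getD j 0 = 0 := by
  simp [List.getD, List.getElem?_replicate]
  split <;> simp

theorem slice_self (xs : List Int) :
    (List.range' 0 xs.length).map (fun i => xs.getD i 0) = xs := by
  apply List.ext_getElem (by simp)
  intro i h1 h2
  simp [List.getElem_range', h2]

theorem build_ok (nums1 lz : List Int) (hlz : ∀ j, lz.getD j 0 = 0) :
    ∀ (fe node s e : Nat) (tree : List Int),
    s ≤ e → e + 1 - s ≤ fe → 1 ≤ node →
    (∀ j, InSubT node s e j → j < tree.length) →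
    (buildA nums1 fe node s e tree).length = tree.length ∧
    (∀ j, ¬ InSubT node s e j → (buildA nums1 fe node s e tree).getD j 0 = tree.getD j 0) ∧
    decodeT (buildA nums1 fe node s e tree, lz) node s e
      = (List.range' s (e+1-s)).map (fun i => nums1.getD i 0) ∧
    GoodT (buildA nums1 fe node s e tree, lz) node s e := by
  intro fe
  induction fe with
  | zero => intro node s e tree hse hfe hn hb; omega
  | succ fe ih =>
    intro node s e tree hse hfe hn hb
    by_cases hleaf : s = e
    · subst hleaf
      rw [buildA, if_pos rfl]
      have hnd : node < tree.length := hb node (InSubT_self _ _ _)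
      have hdec : decodeT (tree.set node (nums1.getD s 0), lz) node s s = [nums1.getD s 0] := by
        rw [decodeT, if_pos le_rfl]
        show [(tree.set node (nums1.getD s 0)).getD node 0] = _
        rw [lget_set_self _ _ _ hnd]
      refine ⟨by simp, ?_, ?_, ?_⟩
      · intro j hj
        exact lget_set_ne _ _ _ _ (fun h => hj (h ▸ InSubT_self _ _ _))
      · rw [hdec]
        simp [List.range'_succ]
      · refine GoodT_intro _ _ _ _ ?_ (fun h => absurd le_rfl h)
        rw [hdec]
        show (tree.set node (nums1.getD s 0)).getD node 0 = _
        rw [lget_set_self _ _ _ hnd]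
        simp
    · have hse' : s < e := by omega
      have hnleaf : ¬ e ≤ s := by omega
      have hsubL : ∀ j, InSubT (2*node) s ((s+e)/2) j → InSubT node s e j :=
        fun j hj => (InSubT_iff node s e j).mpr (Or.inr ⟨hse', Or.inl hj⟩)
      have hsubR : ∀ j, InSubT (2*node+1) ((s+e)/2+1) e j → InSubT node s e j :=
        fun j hj => (InSubT_iff node s e j).mpr (Or.inr ⟨hse', Or.inr hj⟩)
      obtain ⟨L1, Lframe, Ldec, Lgood⟩ :=
        ih (2*node) s ((s+e)/2) tree (by omega) (by omega) (by omega)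
          (fun j hj => hb j (hsubL j hj))
      obtain ⟨R1, Rframe, Rdec, Rgood⟩ :=
        ih (2*node+1) ((s+e)/2+1) e (buildA nums1 fe (2*node) s ((s+e)/2) tree)
          (by omega) (by omega) (by omega)
          (fun j hj => by rw [L1]; exact hb j (hsubR j hj))
      set t1 := buildA nums1 fe (2*node) s ((s+e)/2) tree with ht1
      set t2 := buildA nums1 fe (2*node+1) ((s+e)/2+1) e t1 with ht2
      have hteq : buildA nums1 (fe+1) node s e tree
          = t2.set node (t2.getD (2*node) 0 + t2.getD (2*node+1) 0) := by
        rw [buildA, if_neg hleaf]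
      set t3 := t2.set node (t2.getD (2*node) 0 + t2.getD (2*node+1) 0) with ht3
      have hag12L : ∀ j, InSubT (2*node) s ((s+e)/2) j →
          (t1, lz).1.getD j 0 = (t2, lz).1.getD j 0 ∧ (t1, lz).2.getD j 0 = (t2, lz).2.getD j 0 := by
        intro j hj
        have hnotR : ¬ InSubT (2*node+1) ((s+e)/2+1) e j :=
          fun hc => sib_disj node s ((s+e)/2) ((s+e)/2+1) e j hn hj hc
        exact ⟨(Rframe j hnotR).symm, rfl⟩
      have hag23 : ∀ (c' s' e' : Nat), 2*node ≤ c' → ∀ j, InSubT c' s' e' j →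
          (t2, lz).1.getD j 0 = (t3, lz).1.getD j 0 ∧ (t2, lz).2.getD j 0 = (t3, lz).2.getD j 0 := by
        intro c' s' e' hc' j hj
        have := InSubT_le _ _ _ _ hj
        exact ⟨(lget_set_ne _ _ _ _ (by omega : node ≠ j)).symm, rfl⟩
      have hdec3L : decodeT (t3, lz) (2*node) s ((s+e)/2)
          = (List.range' s ((s+e)/2+1-s)).map (fun i => nums1.getD i 0) := by
        rw [← decodeT_congr (t2, lz) (t3, lz) _ _ _ (hag23 (2*node) s ((s+e)/2) le_rfl),
          ← decodeT_congr (t1, lz) (t2, lz) _ _ _ hag12L]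
        exact Ldec
      have hdec3R : decodeT (t3, lz) (2*node+1) ((s+e)/2+1) e
          = (List.range' ((s+e)/2+1) (e+1-((s+e)/2+1))).map (fun i => nums1.getD i 0) := by
        rw [← decodeT_congr (t2, lz) (t3, lz) _ _ _ (hag23 (2*node+1) ((s+e)/2+1) e (by omega))]
        exact Rdec
      have hlzP : ¬ ((t3, lz).2.getD node 0 ≠ 0) := by
        show ¬ (lz.getD node 0 ≠ 0)
        rw [hlz node]; norm_num
      have hdecsplit : decodeT (t3, lz) node s e
          = decodeT (t3, lz) (2*node) s ((s+e)/2) ++ decodeT (t3, lz) (2*node+1) ((s+e)/2+1) e := by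
        rw [decodeT, if_neg hnleaf, if_neg hlzP]
      have hnd3 : node < t2.length := by rw [R1, L1]; exact hb node (InSubT_self _ _ _)
      have hdecmain : decodeT (t3, lz) node s e
          = (List.range' s (e+1-s)).map (fun i => nums1.getD i 0) := by
        rw [hdecsplit, hdec3L, hdec3R, ← List.map_append]
        congr 1
        have h2 : s + ((s+e)/2+1-s) = (s+e)/2+1 := by omega
        have h1 : (s+e)/2+1-s + (e+1-((s+e)/2+1)) = e+1-s := by omega
        calc List.range' s ((s+e)/2+1-s) ++ List.range' ((s+e)/2+1) (e+1-((s+e)/2+1))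
            = List.range' s ((s+e)/2+1-s) ++ List.range' (s + ((s+e)/2+1-s)) (e+1-((s+e)/2+1)) := by
              rw [h2]
          _ = List.range' s ((s+e)/2+1-s + (e+1-((s+e)/2+1))) := List.range'_append_1
          _ = List.range' s (e+1-s) := by rw [h1]
      rw [hteq]
      refine ⟨by simp [ht3, R1, L1], ?_, hdecmain, ?_⟩
      · intro j hj
        have hjn : node ≠ j := fun h => hj (h ▸ InSubT_self _ _ _)
        show (t2.set node _).getD j 0 = _
        rw [lget_set_ne _ _ _ _ hjn, Rframe j (fun h => hj (hsubR j h)),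
          Lframe j (fun h => hj (hsubL j h))]
      · refine GoodT_intro _ _ _ _ ?_ ?_
        · show (t2.set node _).getD node 0 = _
          rw [lget_set_self _ _ _ hnd3, hdecsplit, List.sum_append]
          congr 1
          · rw [show t2.getD (2*node) 0 = (t2, lz).1.getD (2*node) 0 from rfl,
              GoodT_sum _ _ _ _ (GoodT_congr _ _ _ _ _ hag12L Lgood),
              decodeT_congr (t2, lz) (t3, lz) _ _ _ (hag23 (2*node) s ((s+e)/2) le_rfl)]
          · rw [show t2.getD (2*node+1) 0 = (t2, lz).1.getD (2*node+1) 0 from rfl,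
              GoodT_sum _ _ _ _ Rgood,
              decodeT_congr (t2, lz) (t3, lz) _ _ _ (hag23 (2*node+1) ((s+e)/2+1) e (by omega))]
        · intro _
          exact ⟨GoodT_congr _ _ _ _ _ (hag23 (2*node) s ((s+e)/2) le_rfl)
              (GoodT_congr _ _ _ _ _ hag12L Lgood),
            GoodT_congr _ _ _ _ _ (hag23 (2*node+1) ((s+e)/2+1) e (by omega)) Rgood⟩

theorem togB_spec : ∀ (cnt lo : Nat) (arr : List Int) (ones : Int),
    lo + cnt ≤ arr.length → ones = arr.sum →
    (togB (List.range' lo cnt) (arr, ones)).1.length = arr.length ∧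
    (∀ j, (togB (List.range' lo cnt) (arr, ones)).1.getD j 0
        = if lo ≤ j ∧ j < lo + cnt ∧ j < arr.length then 1 - arr.getD j 0 else arr.getD j 0) ∧
    (togB (List.range' lo cnt) (arr, ones)).2 = (togB (List.range' lo cnt) (arr, ones)).1.sum := by
  intro cnt
  induction cnt with
  | zero =>
    intro lo arr ones hle hones
    refine ⟨rfl, ?_, hones⟩
    intro j
    rw [if_neg (by omega)]
    rfl
  | succ cnt ihc =>
    intro lo arr ones hle hones
    have hlo : lo < arr.length := by omega
    rw [List.range'_succ]
    show (togB (lo :: List.range' (lo+1) cnt) (arr, ones)).1.length = _ ∧ _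
    rw [togB]
    have hsum' : ones + (1 - 2 * arr.getD lo 0)
        = (arr.set lo (1 - arr.getD lo 0)).sum := by
      rw [sum_set_getD _ _ _ hlo, ← hones]
      ring
    have hlen' : lo + 1 + cnt ≤ (arr.set lo (1 - arr.getD lo 0)).length := by
      simp [List.length_set]; omega
    obtain ⟨ih1, ih2, ih3⟩ := ihc (lo+1) (arr.set lo (1 - arr.getD lo 0))
      (ones + (1 - 2 * arr.getD lo 0)) hlen' hsum'
    refine ⟨by rw [ih1]; simp, ?_, ih3⟩
    intro j
    rw [ih2 j]
    by_cases hj : j = lo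
    · subst hj
      rw [if_neg (by omega), if_pos (by omega)]
      exact lget_set_self _ _ _ hlo
    · simp only [List.length_set]
      by_cases hin : lo + 1 ≤ j ∧ j < lo + 1 + cnt ∧ j < arr.length
      · rw [if_pos hin, if_pos (by omega), lget_set_ne _ _ _ _ (fun h => hj h.symm)]
      · rw [if_neg hin, if_neg (by omega), lget_set_ne _ _ _ _ (fun h => hj h.symm)]

theorem Bstep_eq (n : Nat) (l r : Int) (arr : List Int) (ones : Int)
    (hlen : arr.length = n) (hones : ones = arr.sum) :
    togB (List.range' ((max l 0).toNat) (((min r ((n:Int)-1)) + 1).toNat - (max l 0).toNat)) (arr, ones)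
      = (flipSegI l r 0 arr, (flipSegI l r 0 arr).sum) := by
  by_cases hcempty : ((min r ((n:Int)-1)) + 1).toNat ≤ (max l 0).toNat
  · have hcnt : ((min r ((n:Int)-1)) + 1).toNat - (max l 0).toNat = 0 := by omega
    rw [hcnt]
    have hid : flipSegI l r 0 arr = arr := flipSegI_none l r 0 arr (by
      intro k hk
      rw [hlen] at hk
      omega)
    rw [hid]
    exact Prod.ext rfl hones
  have hle : (max l 0).toNat + (((min r ((n:Int)-1)) + 1).toNat - (max l 0).toNat) ≤ arr.length := by
    rw [hlen]
    omega
  obtain ⟨T1, T2, T3⟩ := togB_spec (((min r ((n:Int)-1)) + 1).toNat - (max l 0).toNat)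
    ((max l 0).toNat) arr ones hle hones
  have hfst : (togB (List.range' ((max l 0).toNat)
        (((min r ((n:Int)-1)) + 1).toNat - (max l 0).toNat)) (arr, ones)).1
      = flipSegI l r 0 arr := by
    apply List.ext_getElem (by rw [T1, flipSegI_length])
    intro i h1 h2
    rw [← List.getD_eq_getElem _ 0 h1, ← List.getD_eq_getElem _ 0 h2, T2 i]
    have hi : i < arr.length := by rw [flipSegI_length] at h2; exact h2
    have hflip : (flipSegI l r 0 arr).getD i 0
        = if l ≤ (0:Int) + i ∧ (0:Int) + i ≤ r then 1 - arr[i] else arr[i] := by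
      rw [List.getD_eq_getElem _ 0 h2]
      exact flipSegI_getElem l r 0 arr i hi
    rw [hflip, List.getD_eq_getElem _ 0 hi]
    by_cases hc : l ≤ (0:Int) + i ∧ (0:Int) + i ≤ r
    · rw [if_pos hc, if_pos (by rw [hlen] at hi ⊢; omega)]
    · rw [if_neg hc, if_neg (by rw [hlen] at hi ⊢; omega)]
  exact Prod.ext hfst (by rw [T3, hfst])

theorem loop_eq (n : Nat) (hn : 1 ≤ n) :
    ∀ (qs : List (List Int)) (σ : List Int × List Int) (arr : List Int) (ones sum2 : Int)
      (res : List Int),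
    σ.1.length = 4*n → σ.2.length = 4*n →
    GoodT σ 1 0 (n-1) → LazyOkT σ 1 0 (n-1) →
    decodeT σ 1 0 (n-1) = arr → ones = arr.sum → arr.length = n →
    loopA n qs σ sum2 res = loopB n qs arr ones sum2 res := by
  intro qs
  induction qs with
  | nil => intros; rfl
  | cons q qs ihq =>
    intro σ arr ones sum2 res hl1 hl2 hg hlok hdec hones hlen
    by_cases h1 : q.getD 0 0 = 1
    · rw [loopA, loopB, if_pos h1, if_pos h1]
      obtain ⟨T1, T2, _, TG, TL, TD⟩ := toggle_ok (q.getD 1 0) (q.getD 2 0) n 1 0 (n-1) σ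
        (by omega) (by omega) le_rfl
        (fun j hj => ⟨by rw [hl1]; exact rootBound n j hn hj, by rw [hl2]; exact rootBound n j hn hj⟩)
        hg hlok
      have hB := Bstep_eq n (q.getD 1 0) (q.getD 2 0) arr ones hlen hones
      show loopA n qs _ sum2 res = loopB n qs
        (togB (List.range' ((max (q.getD 1 0) 0).toNat)
          (((min (q.getD 2 0) ((n:Int)-1)) + 1).toNat - (max (q.getD 1 0) 0).toNat)) (arr, ones)).1
        (togB _ (arr, ones)).2 sum2 res
      rw [hB]
      apply ihq
      · rw [T1, hl1]
      · rw [T2, hl2]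
      · exact TG
      · exact TL
      · rw [TD, hdec]
        norm_num
      · rfl
      · rw [flipSegI_length, hlen]
    · by_cases h2 : q.getD 0 0 = 2
      · rw [loopA, loopB, if_neg h1, if_pos h2, if_neg h1, if_pos h2]
        have : σ.1.getD 1 0 = ones := by
          rw [GoodT_sum _ _ _ _ hg, hdec, hones]
        rw [this]
        exact ihq σ arr ones _ res hl1 hl2 hg hlok hdec hones hlen
      · rw [loopA, loopB, if_neg h1, if_neg h2, if_neg h1, if_neg h2]
        exact ihq σ arr ones sum2 _ hl1 hl2 hg hlok hdec hones hlen

-- ===== VERDICT (by name: the statement is the Claim_ definition above) =====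
theorem handleQuery_spec : Claim_equal_handleQuery := by
  unfold Claim_equal_handleQuery
  intro nums1 nums2 queries _ hpre
  show handleQuery nums1 nums2 queries = handleQuery_alt nums1 nums2 queries
  have hn : 1 ≤ nums1.length := by
    cases nums1 with
    | nil => exact absurd rfl hpre.1
    | cons a as => simp
  unfold handleQuery handleQuery_alt
  obtain ⟨B1, _, B3, B4⟩ := build_ok nums1 (List.replicate (4*nums1.length) 0)
    (fun j => replicate_getD _ _) nums1.length 1 0 (nums1.length - 1)
    (List.replicate (4*nums1.length) 0) (by omega) (by omega) le_rfl
    (fun j hj => by rw [List.length_replicate]; exact rootBound _ j hn hj)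
  apply loop_eq nums1.length hn queries _ nums1 _ _ []
  · rw [B1]; exact List.length_replicate
  · exact List.length_replicate
  · exact B4
  · intro j hj
    exact Or.inl (replicate_getD _ _)
  · rw [B3]
    have h0 : nums1.length - 1 + 1 - 0 = nums1.length := by omega
    rw [h0]
    exact slice_self nums1
  · rfl
  · rfl
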